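-- pv_equiv track=rewrite | github.com/Mark-Mekhail/Meta-Careers-Coding-Puzzle-Solutions | Level 1/Uniform Integers/python/Uniform_Integers.py | getNextUniform
-- ===== SOURCE A (Python) =====
-- def getNextUniform(val: int):
--   numDigits = len(str(val))
--   firstDigit = val // (10 ** (numDigits - 1))
--
--   jumpToNext = 1
--   nextUniform = firstDigit
--
--   for _ in range(numDigits - 1):
--     nextUniform *= 10
--     jumpToNext *= 10
--
--     nextUniform += firstDigit
--     jumpToNext += 1
--
--   if nextUniform < val:
--     nextUniform += jumpToNext
--
--   return nextUniform
-- ===== SOURCE B (Python) =====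
-- def getNextUniform(val: int):
--   # Same value as A, but the repunit is computed by the closed form (10**n - 1)//9
--   # instead of an iterative digit-by-digit construction (objective: simpler).
--   n = len(str(val))
--   d = val // 10 ** (n - 1)
--   r = (10 ** n - 1) // 9
--   candidate = d * r
--   return candidate + r if candidate < val else candidate
-- ===== Notes on version B (the rewrite author's own statement) =====
-- stated objective: simpler
-- what changed: A builds the n-digit repdigit and the jump amount with a loop multiplying and adding digit by digit; B replaces the loop by the closed-form repunit (a power of ten minus one, divided by nine) and one multiplication, then the same single bump.
import Mathlib
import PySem

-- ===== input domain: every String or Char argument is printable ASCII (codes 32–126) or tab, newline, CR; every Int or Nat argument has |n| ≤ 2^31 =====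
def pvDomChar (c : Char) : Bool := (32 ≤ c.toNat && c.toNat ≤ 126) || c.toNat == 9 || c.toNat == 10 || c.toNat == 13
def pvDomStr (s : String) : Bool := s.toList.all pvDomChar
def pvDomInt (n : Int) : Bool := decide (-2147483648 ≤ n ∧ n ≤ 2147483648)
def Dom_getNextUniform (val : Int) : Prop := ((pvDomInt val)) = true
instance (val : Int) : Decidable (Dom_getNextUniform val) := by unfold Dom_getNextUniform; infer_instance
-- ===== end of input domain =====

-- B computes the repunit by a closed arithmetic form instead of A's digit-by-digit loop (objective: simpler).
-- ===== PORT A =====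
def getNextUniform (val : Int) : Int :=
  let numDigits : Nat := (PySem.Int.toChars val).length
  let firstDigit : Int := PySem.Int.floordiv val (10 ^ (numDigits - 1))
  -- for _ in range(numDigits - 1): nextUniform *= 10; jumpToNext *= 10; nextUniform += firstDigit; jumpToNext += 1
  let st : Int × Int :=
    (PySem.List.pyRange 0 ((numDigits : Int) - 1) 1).foldl
      (fun (st : Int × Int) _ => (st.1 * 10 + firstDigit, st.2 * 10 + 1))
      (firstDigit, 1)
  if st.1 < val then st.1 + st.2 else st.1

-- ===== PORT B =====
def getNextUniform_alt (val : Int) : Int :=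
  let n : Nat := (PySem.Int.toChars val).length
  let d : Int := PySem.Int.floordiv val (10 ^ (n - 1))
  let r : Int := PySem.Int.floordiv (10 ^ n - 1) 9
  let candidate : Int := d * r
  if candidate < val then candidate + r else candidate

-- ===== PRECONDITION & SPEC =====
def Spec_getNextUniform (val : Int) (out : Int) : Prop := out = getNextUniform_alt val
instance (val : Int) (out : Int) : Decidable (Spec_getNextUniform val out) := by unfold Spec_getNextUniform; infer_instance

-- ===== CLAIM (what is proved, stated in full; the proofs are below) =====
def Claim_equal_getNextUniform : Prop := ∀ (val : Int), Dom_getNextUniform val → Spec_getNextUniform val (getNextUniform val)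

-- ===== LEMMAS AND PROOFS =====

-- the repunit 1, 11, 111, … with k+1 ones, built as A's loop builds it
def pvRep (k : Nat) : Int := match k with
  | 0 => 1
  | k + 1 => pvRep k * 10 + 1

theorem pvRep_mul9 (k : Nat) : 9 * pvRep k = 10 ^ (k + 1) - 1 := by
  induction k with
  | zero => simp [pvRep]
  | succ k ih =>
    have h9 : 9 * pvRep (k + 1) = 10 * (9 * pvRep k) + 9 := by rw [pvRep]; ring
    rw [h9, ih, pow_succ]; ring

theorem pv_floordiv_rep (k : Nat) : PySem.Int.floordiv (10 ^ (k + 1) - 1) 9 = pvRep k := by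
  rw [← pvRep_mul9, PySem.Int.floordiv_eq_ediv_of_pos (by norm_num)]
  exact Int.mul_ediv_cancel_left _ (by norm_num)

theorem pv_foldl_ignore {σ : Type} (l : List Int) (g : σ → σ) (s : σ) :
    l.foldl (fun s _ => g s) s = g^[l.length] s := by
  induction l generalizing s with
  | nil => rfl
  | cons x xs ih => simp [List.foldl, ih, Function.iterate_succ_apply]

theorem pv_iterate_rep (d : Int) (k : Nat) :
    (fun (st : Int × Int) => (st.1 * 10 + d, st.2 * 10 + 1))^[k] (d, 1)
      = (d * pvRep k, pvRep k) := by
  induction k with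
  | zero => simp [pvRep]
  | succ k ih => rw [Function.iterate_succ_apply', ih]; simp [pvRep]; ring

theorem pv_toDigitsCore_ne_nil (f n : Nat) (c : Char) (cs : List Char) :
    Nat.toDigitsCore 10 f n (c :: cs) ≠ [] := by
  induction f generalizing n c cs with
  | zero => simp [Nat.toDigitsCore]
  | succ f ih => rw [Nat.toDigitsCore]; split <;> simp_all

theorem pv_toChars_ne_nil (v : Int) : PySem.Int.toChars v ≠ [] := by
  have h : ∀ n : Nat, Nat.toDigits 10 n ≠ [] := by
    intro n
    rw [Nat.toDigits, Nat.toDigitsCore]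
    split
    · simp
    · exact pv_toDigitsCore_ne_nil _ _ _ _
  unfold PySem.Int.toChars
  split <;> simp_all

-- ===== VERDICT (by name: the statement is the Claim_ definition above) =====
theorem getNextUniform_spec : Claim_equal_getNextUniform := by
  intro val _
  have h := pv_toChars_ne_nil val
  obtain ⟨k, hk⟩ : ∃ k, (PySem.Int.toChars val).length = k + 1 := by
    cases hl : (PySem.Int.toChars val).length with
    | zero => exact absurd (List.length_eq_zero_iff.mp hl) h
    | succ k => exact ⟨k, rfl⟩
  simp only [Spec_getNextUniform, getNextUniform, getNextUniform_alt, hk,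
    Nat.add_sub_cancel]
  have hrange : ((k + 1 : Nat) : Int) - 1 = ((k : Nat) : Int) := by push_cast; ring
  rw [hrange, pv_foldl_ignore]
  simp only [PySem.List.length_pyRange_one, sub_zero, Int.toNat_natCast]
  rw [pv_iterate_rep, pv_floordiv_rep]
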